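-- pv_equiv track=rewrite | github.com/LeeMK1983/Inspiring_Your_Day | m1_keyword_scoring.py | map_input_to_keyword
-- ===== SOURCE A (Python) =====
-- def map_input_to_keyword(user_text, keyword_dict):
--     user_words = set(user_text.lower().split())
--     best_keyword = None
--     best_score = 0
--
--     for keyword, synonyms in keyword_dict.items():
--         # The set() function creates a set, which is an unoredered, unindexed collection of unique elements(remove duplicates)
--         synonym_set = set(syn.lower() for syn in synonyms)
--         score = len(user_words.intersection(synonym_set))
--         if score > best_score:
--             best_score = score
--             best_keyword = keyword
--     return best_keyword if best_score >0 else None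
-- ===== SOURCE B (Python) =====
-- def map_input_to_keyword(user_text, keyword_dict):
--     user_words = set(user_text.lower().split())
--     entries = list(keyword_dict.items())
--     # inverted index: lowercased synonym word -> positions of the entries containing it
--     index = {}
--     for i, (keyword, synonyms) in enumerate(entries):
--         for syn in set(s.lower() for s in synonyms):
--             index.setdefault(syn, []).append(i)
--     # one pass over the user's words, counting hits per entry
--     counts = {}
--     for word in user_words:
--         for i in index.get(word, []):
--             counts[i] = counts.get(i, 0) + 1
--     best_keyword = None
--     best_score = 0
--     for i, (keyword, _) in enumerate(entries):
--         score = counts.get(i, 0)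
--         if score > best_score:
--             best_score = score
--             best_keyword = keyword
--     return best_keyword if best_score > 0 else None
-- ===== Notes on version B (the rewrite author's own statement) =====
-- stated objective: alternative
-- what changed: Replaces the per-keyword set-intersection scan with an inverted index from lowercased synonym words to entry positions, built once; scores come from a single counting pass over the user's words, and a final in-order scan reproduces the first-strict-maximum tie-breaking.
import Mathlib
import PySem

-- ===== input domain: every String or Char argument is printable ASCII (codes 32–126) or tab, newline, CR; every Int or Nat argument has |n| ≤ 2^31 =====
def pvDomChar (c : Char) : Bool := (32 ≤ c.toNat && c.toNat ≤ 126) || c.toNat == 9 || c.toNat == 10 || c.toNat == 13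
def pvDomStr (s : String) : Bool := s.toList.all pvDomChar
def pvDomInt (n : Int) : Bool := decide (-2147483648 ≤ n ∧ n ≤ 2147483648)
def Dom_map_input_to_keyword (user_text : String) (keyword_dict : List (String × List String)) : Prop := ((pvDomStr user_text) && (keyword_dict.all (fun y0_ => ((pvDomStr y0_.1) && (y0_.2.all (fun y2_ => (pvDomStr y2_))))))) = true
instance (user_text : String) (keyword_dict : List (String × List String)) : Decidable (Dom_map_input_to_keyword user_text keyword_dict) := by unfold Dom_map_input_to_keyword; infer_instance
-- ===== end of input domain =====

-- B replaces A's per-keyword set intersections with an inverted index (synonym word -> entry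
-- positions) plus one counting pass over the user's words; same result, proved equal on Dom.


-- ===== PORT A =====
def map_input_to_keyword (user_text : String) (keyword_dict : List (String × List String)) : Option String :=
  let user_words : PySem.Set String := PySem.Set.ofList (PySem.Str.split₀ (PySem.Str.lower user_text))
  let r := keyword_dict.foldl (fun (st : Option String × Int) p =>
      let synonym_set : PySem.Set String := PySem.Set.ofList (p.2.map PySem.Str.lower)
      let score := PySem.Set.len (PySem.Set.inter user_words synonym_set)
      if st.2 < score then (some p.1, score) else st) (none, 0)
  if 0 < r.2 then r.1 else none

-- ===== PORT B =====
def map_input_to_keyword_alt (user_text : String) (keyword_dict : List (String × List String)) : Option String :=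
  let user_words : PySem.Set String := PySem.Set.ofList (PySem.Str.split₀ (PySem.Str.lower user_text))
  let index : PySem.Dict String (List Int) :=
    (PySem.List.enumerate keyword_dict).foldl (fun d p =>
      (PySem.Set.ofList (p.2.2.map PySem.Str.lower)).foldl
        (fun d syn => d.insert syn (d.getD syn [] ++ [p.1])) d) PySem.Dict.empty
  let counts : PySem.Dict Int Int :=
    user_words.foldl (fun c w =>
      (index.getD w []).foldl (fun c i => c.insert i (c.getD i 0 + 1)) c) PySem.Dict.empty
  let r := (PySem.List.enumerate keyword_dict).foldl (fun (st : Option String × Int) p =>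
      let score := counts.getD p.1 0
      if st.2 < score then (some p.2.1, score) else st) (none, 0)
  if 0 < r.2 then r.1 else none

-- ===== PRECONDITION & SPEC =====
def Spec_map_input_to_keyword (user_text : String) (keyword_dict : List (String × List String)) (out : Option String) : Prop := out = map_input_to_keyword_alt user_text keyword_dict
instance (user_text : String) (keyword_dict : List (String × List String)) (out : Option String) : Decidable (Spec_map_input_to_keyword user_text keyword_dict out) := by unfold Spec_map_input_to_keyword; infer_instance

-- ===== CLAIM (what is proved, stated in full; the proofs are below) =====
def Claim_equal_map_input_to_keyword : Prop := ∀ (user_text : String) (keyword_dict : List (String × List String)), Dom_map_input_to_keyword user_text keyword_dict → Spec_map_input_to_keyword user_text keyword_dict (map_input_to_keyword user_text keyword_dict)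

-- ===== LEMMAS AND PROOFS =====

-- the inner index-building loop: appending i under every key of a duplicate-free list ws
theorem pv_inner_insert (ws : List String) (hnd : ws.Nodup) (d : PySem.Dict String (List Int))
    (i : Int) (w : String) :
    (ws.foldl (fun d syn => d.insert syn (d.getD syn [] ++ [i])) d).getD w []
      = if w ∈ ws then d.getD w [] ++ [i] else d.getD w [] := by
  induction ws generalizing d with
  | nil => simp
  | cons a as ih =>
    simp only [List.foldl_cons]
    rw [ih (List.Nodup.of_cons hnd)]
    by_cases hwa : w = a
    · subst hwa
      have : w ∉ as := (List.nodup_cons.mp hnd).1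
      simp [this]
    · simp [List.mem_cons, hwa, PySem.Dict.getD_insert]

-- the index built by the outer loop, characterised key-by-key
theorem pv_idx_getD (l : List (Int × (String × List String))) (d : PySem.Dict String (List Int))
    (w : String) :
    (l.foldl (fun d p =>
        (PySem.Set.ofList (p.2.2.map PySem.Str.lower)).foldl
          (fun d syn => d.insert syn (d.getD syn [] ++ [p.1])) d) d).getD w []
      = d.getD w [] ++ (l.filter
          (fun p => (PySem.Set.ofList (p.2.2.map PySem.Str.lower)).contains w)).map (·.1) := by
  induction l generalizing d with
  | nil => simp
  | cons p l ih =>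
    simp only [List.foldl_cons, List.filter_cons]
    rw [ih, pv_inner_insert _ (PySem.Set.nodup_ofList _)]
    by_cases hw : w ∈ PySem.Set.ofList (p.2.2.map PySem.Str.lower)
    · simp [hw]
    · have hcw : (PySem.Set.ofList (p.2.2.map PySem.Str.lower)).contains w = false := by
        rw [← Bool.not_eq_true, PySem.Set.contains_iff]; exact hw
      simp [hw]

-- the counting double loop equals counting in the flattened index lists
theorem pv_cnt_getD (idx : PySem.Dict String (List Int)) (ws : List String)
    (c : PySem.Dict Int Int) (i : Int) :
    (ws.foldl (fun c w => (idx.getD w []).foldl (fun c j => c.insert j (c.getD j 0 + 1)) c) c).getD i 0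
      = c.getD i 0 + ((ws.flatMap (fun w => idx.getD w [])).count i : Nat) := by
  induction ws generalizing c with
  | nil => simp
  | cons a as ih =>
    simp only [List.foldl_cons, List.flatMap_cons, List.count_append]
    rw [ih, PySem.Dict.getD_foldl_insert_add_one]
    push_cast
    ring

-- exactly one entry of enumerate has a given in-range first component
theorem pv_countP_fst_enumerate {α : Type} (l : List α) (P : Int × α → Bool) :
    ∀ (s : Int) (k : Nat) (hk : k < l.length),
      List.countP (fun p => p.1 == s + (k : Int) && P p) (PySem.List.enumerate l s)
        = if P (s + (k : Int), l[k]) then 1 else 0 := by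
  induction l with
  | nil => intro s k hk; simp at hk
  | cons x xs ih =>
    intro s k hk
    rw [PySem.List.enumerate_cons, List.countP_cons]
    cases k with
    | zero =>
      have hz : List.countP (fun p => p.1 == s + ((0 : Nat) : Int) && P p)
          (PySem.List.enumerate xs (s + 1)) = 0 := by
        rw [List.countP_eq_zero]
        intro p hp
        rcases (PySem.List.mem_enumerate_iff xs (s + 1) p).mp hp with ⟨j, hj, rfl⟩
        simp only [Bool.and_eq_true, beq_iff_eq]
        rintro ⟨h1, -⟩
        omega
      rw [hz]
      simp
    | succ k =>
      have hk' : k < xs.length := by simpa using hk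
      have := ih (s + 1) k hk'
      have harith : (s + 1) + (k : Int) = s + ((k + 1 : Nat) : Int) := by push_cast; ring
      rw [harith] at this
      rw [this]
      have hhd : ((s, x).1 == s + ((k + 1 : Nat) : Int) && P (s, x)) = false := by
        simp only [Bool.and_eq_false_iff, beq_eq_false_iff_ne, ne_eq]
        left; intro h; omega
      rw [hhd]
      simp

-- how often index k appears in the index list of one word
theorem pv_idxlist_count (kd : List (String × List String)) (w : String) (k : Nat)
    (hk : k < kd.length) :
    ((((PySem.List.enumerate kd).filter
        (fun p => (PySem.Set.ofList (p.2.2.map PySem.Str.lower)).contains w)).map (·.1)).count (k : Int))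
      = if (PySem.Set.ofList ((kd[k].2).map PySem.Str.lower)).contains w then 1 else 0 := by
  rw [List.count_eq_countP, List.countP_map, List.countP_filter]
  have h := pv_countP_fst_enumerate kd
      (fun p => (PySem.Set.ofList (p.2.2.map PySem.Str.lower)).contains w) 0 k hk
  simp only [zero_add] at h
  rw [← h]
  simp [Function.comp]

-- per-entry score of B equals per-entry score of A
theorem pv_flat_count (kd : List (String × List String)) (U : List String) (k : Nat)
    (hk : k < kd.length) :
    ((U.flatMap (fun w =>
        (((PySem.List.enumerate kd).filter
          (fun p => (PySem.Set.ofList (p.2.2.map PySem.Str.lower)).contains w)).map (·.1)))).count (k : Int))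
      = U.countP (fun w => (PySem.Set.ofList ((kd[k].2).map PySem.Str.lower)).contains w) := by
  induction U with
  | nil => simp
  | cons w U ih =>
    rw [List.flatMap_cons, List.count_append, ih, pv_idxlist_count kd w k hk, List.countP_cons,
      Nat.add_comm]

-- the two selection folds agree when the per-entry scores agree
theorem pv_fold_main (f : (String × List String) → Int) (g : Int → Int) :
    ∀ (l : List (String × List String)) (s : Int) (st : Option String × Int),
      (∀ p ∈ PySem.List.enumerate l s, g p.1 = f p.2) →
      List.foldl (fun (st : Option String × Int) p =>
          if st.2 < f p then (some p.1, f p) else st) st l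
        = List.foldl (fun (st : Option String × Int) p =>
          if st.2 < g p.1 then (some p.2.1, g p.1) else st) st (PySem.List.enumerate l s) := by
  intro l
  induction l with
  | nil => intro s st h; simp
  | cons x xs ih =>
    intro s st h
    rw [PySem.List.enumerate_cons, List.foldl_cons, List.foldl_cons]
    have hx : g s = f x := by
      have := h (s, x) (by rw [PySem.List.enumerate_cons]; exact List.mem_cons_self ..)
      simpa using this
    rw [hx]
    exact ih (s + 1) _ (fun p hp => h p (by rw [PySem.List.enumerate_cons]; exact List.mem_cons_of_mem _ hp))

-- ===== VERDICT (by name: the statement is the Claim_ definition above) =====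
theorem map_input_to_keyword_spec : Claim_equal_map_input_to_keyword := by
  intro user_text keyword_dict _
  unfold Spec_map_input_to_keyword map_input_to_keyword map_input_to_keyword_alt
  simp only []
  set U := PySem.Set.ofList (PySem.Str.split₀ (PySem.Str.lower user_text)) with hU
  set IDX := (PySem.List.enumerate keyword_dict).foldl (fun d p =>
      (PySem.Set.ofList (p.2.2.map PySem.Str.lower)).foldl
        (fun d syn => d.insert syn (d.getD syn [] ++ [p.1])) d)
      (PySem.Dict.empty : PySem.Dict String (List Int)) with hIDX
  set CNT := List.foldl (fun c w =>
      (IDX.getD w []).foldl (fun c i => c.insert i (c.getD i 0 + 1)) c)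
      (PySem.Dict.empty : PySem.Dict Int Int) U with hCNT
  have hagree : ∀ p ∈ PySem.List.enumerate keyword_dict 0,
      CNT.getD p.1 0 = PySem.Set.len (PySem.Set.inter U (PySem.Set.ofList (p.2.2.map PySem.Str.lower))) := by
    intro p hp
    rcases (PySem.List.mem_enumerate_iff keyword_dict 0 p).mp hp with ⟨k, hk, rfl⟩
    simp only [zero_add]
    rw [hCNT, pv_cnt_getD, PySem.Dict.getD_empty]
    have hidx : ∀ w, IDX.getD w []
        = ((PySem.List.enumerate keyword_dict).filter
            (fun p => (PySem.Set.ofList (p.2.2.map PySem.Str.lower)).contains w)).map (·.1) := by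
      intro w
      rw [hIDX, pv_idx_getD]
      simp
    simp only [hidx]
    rw [pv_flat_count _ _ _ hk, List.countP_eq_length_filter]
    simp [PySem.Set.len, PySem.Set.inter, PySem.Set.contains_eq_listContains]
  have hfold := pv_fold_main
      (fun p => PySem.Set.len (PySem.Set.inter U (PySem.Set.ofList (p.2.map PySem.Str.lower))))
      (fun i => CNT.getD i 0) keyword_dict 0 (none, 0) hagree
  simp only [] at hfold
  rw [hfold]
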